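-- pv_equiv track=rewrite | github.com/jho951/coding-test | 프로그래머스/0/181829. 이차원 배열 대각선 순회하기/이차원 배열 대각선 순회하기.py | solution
-- ===== SOURCE A (Python) =====
-- def solution(board, k):
--     """
--     i + j <= k를 만족하는 모든 (i, j)에 대한 board[i][j]의 합을 계산합니다.
--
--     Args:
--         board (list[list[int]]): 2차원 정수 배열.
--         k (int): 조건에 사용되는 정수.
--
--     Returns:
--         int: 조건을 만족하는 board[i][j]의 합.
--     """
--     total_sum = 0
--
--     # board의 행(i) 크기를 구합니다.
--     rows = len(board)
--
--     # board가 비어있지 않다면, 열(j) 크기를 구합니다.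
--     # 문제의 조건상 board는 항상 유효하다고 가정합니다.
--     if rows > 0:
--         cols = len(board[0])
--     else:
--         # board가 비어있는 경우 (예외 처리)
--         return 0
--
--     # 2차원 배열을 순회합니다.
--     for i in range(rows):  # 행 인덱스 i
--         for j in range(cols):  # 열 인덱스 j
--
--             # 조건 i + j <= k를 만족하는지 확인합니다.
--             if i + j <= k:
--                 # 조건을 만족하면 해당 원소를 total_sum에 더합니다.
--                 total_sum += board[i][j]
--
--     return total_sum
-- ===== SOURCE B (Python) =====
-- def solution(board, k):
--     # Traverse by anti-diagonals: for each d = i+j from 0 up to min(k, rows+cols-2),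
--     # walk the diagonal's valid i range and add board[i][d-i]; no per-cell i+j<=k test.
--     rows = len(board)
--     if rows == 0:
--         return 0
--     cols = len(board[0])
--     total = 0
--     dmax = min(k, rows + cols - 2)
--     for d in range(dmax + 1):
--         for i in range(max(0, d - (cols - 1)), min(d, rows - 1) + 1):
--             total += board[i][d - i]
--     return total
-- ===== Notes on version B (the rewrite author's own statement) =====
-- stated objective: alternative
-- what changed: Reorganises the pass by anti-diagonals: for each d in 0..min(k, rows+cols-2) it walks i over the arithmetically clamped range of diagonal d and adds board[i][d-i], instead of scanning every cell and testing i+j<=k; diagonals beyond k are never visited.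
import Mathlib
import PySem

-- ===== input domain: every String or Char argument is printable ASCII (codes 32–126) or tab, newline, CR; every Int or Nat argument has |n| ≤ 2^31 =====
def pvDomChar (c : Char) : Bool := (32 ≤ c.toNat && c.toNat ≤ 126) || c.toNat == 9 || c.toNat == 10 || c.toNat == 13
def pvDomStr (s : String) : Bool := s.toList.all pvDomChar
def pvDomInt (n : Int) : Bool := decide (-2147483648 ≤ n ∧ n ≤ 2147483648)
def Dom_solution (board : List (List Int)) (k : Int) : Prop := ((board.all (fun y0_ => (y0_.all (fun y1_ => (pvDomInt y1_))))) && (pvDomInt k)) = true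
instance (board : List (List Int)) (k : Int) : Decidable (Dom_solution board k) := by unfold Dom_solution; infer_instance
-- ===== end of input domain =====

-- B traverses the board by anti-diagonals d = i+j (d from 0 to min(k, rows+cols-2)) instead of scanning every cell with an i+j<=k test; equivalence is over the return value.

-- ===== PORT A =====
def solution (board : List (List Int)) (k : Int) : Int :=
  if 0 < (board.length : Int) then
    let cols : Int := ((PySem.List.pyGet? board 0).getD []).length
    (PySem.List.pyRange 0 (board.length : Int) 1).foldl (fun acc i =>
      (PySem.List.pyRange 0 cols 1).foldl (fun acc j =>
        if i + j ≤ k then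
          acc + ((PySem.List.pyGet? ((PySem.List.pyGet? board i).getD []) j).getD 0)
        else acc) acc) 0
  else 0

-- ===== PORT B =====
def solution_alt (board : List (List Int)) (k : Int) : Int :=
  if (board.length : Int) == 0 then 0
  else
    (PySem.List.pyRange 0 (min k ((board.length : Int) + (((PySem.List.pyGet? board 0).getD []).length : Int) - 2) + 1) 1).foldl (fun total d =>
      (PySem.List.pyRange (max 0 (d - ((((PySem.List.pyGet? board 0).getD []).length : Int) - 1))) (min d ((board.length : Int) - 1) + 1) 1).foldl
        (fun total i =>
          total + ((PySem.List.pyGet? ((PySem.List.pyGet? board i).getD []) (d - i)).getD 0))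
        total) 0

-- ===== PRECONDITION & SPEC =====
-- Pre_ excludes exactly the ragged boards on which the Python A raises IndexError: some row i
-- shorter than the reach min(cols, k-i+1) of the i+j<=k condition (B raises there as well).
def Pre_solution (board : List (List Int)) (k : Int) : Prop :=
  ∀ i, i < board.length →
    min (board.headD []).length (max 0 (k - (i : Int) + 1)).toNat ≤ (board.getD i []).length
instance (board : List (List Int)) (k : Int) : Decidable (Pre_solution board k) := by
  unfold Pre_solution; infer_instance
def pvWitness_solution : List (List Int) × Int := ([[1, 2], [3, 4], [5, 6]], 1)

def Spec_solution (board : List (List Int)) (k : Int) (out : Int) : Prop := out = solution_alt board k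
instance (board : List (List Int)) (k : Int) (out : Int) : Decidable (Spec_solution board k out) := by unfold Spec_solution; infer_instance

-- ===== CLAIM (what is proved, stated in full; the proofs are below) =====
def Claim_equal_solution : Prop := ∀ (board : List (List Int)) (k : Int), Dom_solution board k → Pre_solution board k → Spec_solution board k (solution board k)

-- ===== LEMMAS AND PROOFS =====

-- the element both programs read at (i, j)
def pvCell (board : List (List Int)) (i j : Int) : Int :=
  (PySem.List.pyGet? ((PySem.List.pyGet? board i).getD []) j).getD 0

-- a foldl-accumulated sum over range(a, b) is a Finset.Ico sum
lemma pv_sum_pyRange (f : Int → Int) (a b acc : Int) :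
    (PySem.List.pyRange a b 1).foldl (fun s x => s + f x) acc
      = acc + ∑ x ∈ Finset.Ico a b, f x := by
  rw [PySem.List.foldl_add]
  congr 1
  induction hn : (b - a).toNat generalizing a with
  | zero =>
    rw [PySem.List.pyRange_one_eq_nil (by omega), Finset.Ico_eq_empty (by omega)]
    simp
  | succ n ih =>
    rw [PySem.List.pyRange_one_cons (by omega),
        ← Finset.insert_Ico_add_one_left_eq_Ico (show a < b by omega),
        Finset.sum_insert (by simp)]
    simp [ih (a + 1) (by omega)]

-- A's nested scan with the i+j<=k test, as a double Ico sum of guarded cells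
lemma pv_A_eq (board : List (List Int)) (k : Int) (h : 0 < board.length) :
    solution board k
      = ∑ i ∈ Finset.Ico (0 : Int) board.length,
          ∑ j ∈ Finset.Ico (0 : Int) (((PySem.List.pyGet? board 0).getD []).length : Int),
            if i + j ≤ k then pvCell board i j else 0 := by
  unfold solution
  rw [if_pos (by exact_mod_cast h)]
  rw [PySem.List.foldl_congr_mem _ _
      (fun acc i => acc + ∑ j ∈ Finset.Ico (0 : Int) (((PySem.List.pyGet? board 0).getD []).length : Int),
          if i + j ≤ k then pvCell board i j else 0) 0 ?_]
  · rw [pv_sum_pyRange, zero_add]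
  · intro acc i _
    rw [PySem.List.foldl_congr_mem _ _
        (fun a j => a + if i + j ≤ k then pvCell board i j else 0) acc ?_]
    · rw [pv_sum_pyRange]
    · intro a j _
      unfold pvCell
      by_cases hij : i + j ≤ k <;> simp [hij]

-- B's anti-diagonal pass, as a double Ico sum over diagonals
lemma pv_B_eq (board : List (List Int)) (k : Int) (h : 0 < board.length) :
    solution_alt board k
      = ∑ d ∈ Finset.Ico (0 : Int) (min k ((board.length : Int) + (((PySem.List.pyGet? board 0).getD []).length : Int) - 2) + 1),
          ∑ i ∈ Finset.Ico (max 0 (d - ((((PySem.List.pyGet? board 0).getD []).length : Int) - 1)))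
                           (min d ((board.length : Int) - 1) + 1),
            pvCell board i (d - i) := by
  unfold solution_alt
  rw [if_neg (by simp only [beq_iff_eq]; omega)]
  rw [PySem.List.foldl_congr_mem _ _
      (fun (total d : Int) => total + ∑ i ∈ Finset.Ico (max 0 (d - ((((PySem.List.pyGet? board 0).getD []).length : Int) - 1)))
                           (min d ((board.length : Int) - 1) + 1), pvCell board i (d - i)) 0 ?_]
  · rw [pv_sum_pyRange, zero_add]
  · intro total d _
    exact pv_sum_pyRange (fun i => pvCell board i (d - i)) _ _ total

-- the reindexing (i, j) ↔ (d, i) with d = i + j: both double sums add the same cells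
lemma pv_diag (f : Int → Int → Int) (R C k : Int) :
    ∑ i ∈ Finset.Ico (0 : Int) R, ∑ j ∈ Finset.Ico (0 : Int) C, (if i + j ≤ k then f i j else 0)
      = ∑ d ∈ Finset.Ico (0 : Int) (min k (R + C - 2) + 1),
          ∑ i ∈ Finset.Ico (max 0 (d - (C - 1))) (min d (R - 1) + 1), f i (d - i) := by
  have hA : ∀ i : Int, (∑ j ∈ Finset.Ico (0 : Int) C, if i + j ≤ k then f i j else 0)
      = ∑ j ∈ (Finset.Ico (0 : Int) C).filter (fun j => i + j ≤ k), f i j := by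
    intro i; rw [Finset.sum_filter]
  simp only [hA]
  rw [Finset.sum_sigma' (Finset.Ico (0 : Int) R)
        (fun i => (Finset.Ico (0 : Int) C).filter (fun j => i + j ≤ k)) (fun i j => f i j),
      Finset.sum_sigma' (Finset.Ico (0 : Int) (min k (R + C - 2) + 1))
        (fun d => Finset.Ico (max 0 (d - (C - 1))) (min d (R - 1) + 1)) (fun d i => f i (d - i))]
  refine Finset.sum_nbij' (fun x => ⟨x.1 + x.2, x.1⟩) (fun x => ⟨x.2, x.1 - x.2⟩) ?_ ?_ ?_ ?_ ?_
  · rintro ⟨i, j⟩ hm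
    simp only [Finset.mem_sigma, Finset.mem_Ico, Finset.mem_filter] at hm ⊢
    omega
  · rintro ⟨d, i⟩ hm
    simp only [Finset.mem_sigma, Finset.mem_Ico, Finset.mem_filter] at hm ⊢
    omega
  · rintro ⟨i, j⟩ _; simp
  · rintro ⟨d, i⟩ _; simp
  · rintro ⟨i, j⟩ _; simp

-- ===== VERDICT (by name: the statement is the Claim_ definition above) =====
theorem solution_spec : Claim_equal_solution := by
  intro board k _ _
  unfold Spec_solution
  cases board with
  | nil => rfl
  | cons r0 rest =>
    rw [pv_A_eq _ k (by simp), pv_B_eq _ k (by simp),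
        pv_diag (pvCell (r0 :: rest)) ((r0 :: rest).length : Int)
          (((PySem.List.pyGet? (r0 :: rest) 0).getD []).length : Int) k]
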